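-- pv_equiv track=rewrite | github.com/lherron2/seed-from-alignment | src/lib/refine_unpaired_regions.py | find_unpaired_runs
-- ===== SOURCE A (Python) =====
-- UNPAIRED_CHAR = "."
--
-- def find_unpaired_runs(struct: str, min_len: int) -> list[tuple[int, int]]:
--     runs: list[tuple[int, int]] = []
--     n = len(struct)
--     i = 0
--     while i < n:
--         if struct[i] == UNPAIRED_CHAR:
--             start = i
--             while i < n and struct[i] == UNPAIRED_CHAR:
--                 i += 1
--             if (i - start) >= min_len:
--                 runs.append((start, i))
--         else:
--             i += 1
--     return runs
-- ===== SOURCE B (Python) =====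
-- UNPAIRED_CHAR = "."
--
-- def find_unpaired_runs(struct: str, min_len: int) -> list[tuple[int, int]]:
--     # Stage 1: run-length encode the whole string into (char, count) groups.
--     groups: list[tuple[str, int]] = []
--     for ch in struct:
--         if groups and groups[-1][0] == ch:
--             groups[-1] = (ch, groups[-1][1] + 1)
--         else:
--             groups.append((ch, 1))
--     # Stage 2: scan the groups with a running position offset.
--     runs: list[tuple[int, int]] = []
--     pos = 0
--     for ch, length in groups:
--         if ch == UNPAIRED_CHAR and length >= min_len:
--             runs.append((pos, pos + length))
--         pos += length
--     return runs
-- ===== Notes on version B (the rewrite author's own statement) =====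
-- stated objective: alternative
-- what changed: Replaces A's single scan with nested index-driven while-loops by a two-stage algorithm: first run-length encode the entire string into (char, count) groups, then scan that encoding with a running position offset, emitting a run for each sufficiently long dot group.
import Mathlib
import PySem

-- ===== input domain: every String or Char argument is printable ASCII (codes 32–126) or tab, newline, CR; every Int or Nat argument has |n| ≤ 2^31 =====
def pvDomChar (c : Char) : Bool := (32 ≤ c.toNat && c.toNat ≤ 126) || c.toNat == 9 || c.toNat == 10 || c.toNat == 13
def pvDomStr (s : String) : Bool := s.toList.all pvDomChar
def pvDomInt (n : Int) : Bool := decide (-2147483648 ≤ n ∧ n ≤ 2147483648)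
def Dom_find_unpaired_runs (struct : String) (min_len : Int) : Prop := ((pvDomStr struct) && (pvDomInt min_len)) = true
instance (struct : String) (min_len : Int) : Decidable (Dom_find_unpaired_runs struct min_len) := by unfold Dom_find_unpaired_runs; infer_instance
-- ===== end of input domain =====

-- B replaces A's nested-while single scan by a two-stage algorithm: run-length encode, then scan the groups (alternative; same cost).

-- ===== PORT A =====
-- inner `while i < n and struct[i] == UNPAIRED_CHAR: i += 1` of A
def pvEatDots : List Char → Int → List Char × Int
  | [], i => ([], i)
  | c :: rest, i => if c = '.' then pvEatDots rest (i + 1) else (c :: rest, i)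

theorem pvEatDots_length : ∀ (cs : List Char) (i : Int), (pvEatDots cs i).1.length ≤ cs.length := by
  intro cs
  induction cs with
  | nil => intro i; simp [pvEatDots]
  | cons c rest ih =>
    intro i
    by_cases h : c = '.'
    · simp only [pvEatDots, if_pos h]
      exact Nat.le_succ_of_le (ih (i + 1))
    · simp [pvEatDots, h]

-- A's outer while-loop over the index
def pvGoA (min_len : Int) : List Char → Int → List (Int × Int)
  | [], _ => []
  | c :: rest, i =>
    if c = '.' then
      let r := pvEatDots rest (i + 1)
      (if r.2 - i ≥ min_len then [(i, r.2)] else []) ++ pvGoA min_len r.1 r.2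
    else
      pvGoA min_len rest (i + 1)
termination_by cs => cs.length
decreasing_by
  · exact Nat.lt_succ_of_le (pvEatDots_length rest (i + 1))
  · simp

def find_unpaired_runs (struct : String) (min_len : Int) : List (Int × Int) :=
  pvGoA min_len struct.toList 0

-- ===== PORT B =====
-- stage-1 loop body: extend the last group or open a new one
def pvGroupStep (groups : List (Char × Int)) (ch : Char) : List (Char × Int) :=
  match groups.getLast? with
  | some (c, k) => if c = ch then groups.dropLast ++ [(c, k + 1)] else groups ++ [(ch, 1)]
  | none => [(ch, 1)]

-- stage-2 loop body: emit a run for a long dot group, advance the offset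
def pvStepB (min_len : Int) (acc : List (Int × Int) × Int) (g : Char × Int) : List (Int × Int) × Int :=
  ((if g.1 = '.' ∧ g.2 ≥ min_len then acc.1 ++ [(acc.2, acc.2 + g.2)] else acc.1), acc.2 + g.2)

def find_unpaired_runs_alt (struct : String) (min_len : Int) : List (Int × Int) :=
  let groups := struct.toList.foldl pvGroupStep []
  (groups.foldl (pvStepB min_len) ([], 0)).1

-- ===== PRECONDITION & SPEC =====
def Spec_find_unpaired_runs (struct : String) (min_len : Int) (out : List (Int × Int)) : Prop := out = find_unpaired_runs_alt struct min_len
instance (struct : String) (min_len : Int) (out : List (Int × Int)) : Decidable (Spec_find_unpaired_runs struct min_len out) := by unfold Spec_find_unpaired_runs; infer_instance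

-- ===== CLAIM (what is proved, stated in full; the proofs are below) =====
def Claim_equal_find_unpaired_runs : Prop := ∀ (struct : String) (min_len : Int), Dom_find_unpaired_runs struct min_len → Spec_find_unpaired_runs struct min_len (find_unpaired_runs struct min_len)

-- ===== LEMMAS AND PROOFS =====

-- recursive characterisation of run-length encoding
def pvRleSpec : List Char → List (Char × Int)
  | [] => []
  | c :: rest => (c, 1 + ((rest.takeWhile (· = c)).length : Int)) :: pvRleSpec (rest.dropWhile (· = c))
termination_by cs => cs.length
decreasing_by
  exact Nat.lt_succ_of_le (List.length_dropWhile_le _ _)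

def pvRleAux (c : Char) (k : Int) (cs : List Char) : List (Char × Int) :=
  (c, k + ((cs.takeWhile (· = c)).length : Int)) :: pvRleSpec (cs.dropWhile (· = c))

theorem pvFold_group : ∀ (cs : List Char) (g : List (Char × Int)) (c : Char) (k : Int),
    cs.foldl pvGroupStep (g ++ [(c, k)]) = g ++ pvRleAux c k cs := by
  intro cs
  induction cs with
  | nil => intro g c k; simp [pvRleAux, pvRleSpec]
  | cons d rest ih =>
    intro g c k
    have hlast : (g ++ [(c, k)]).getLast? = some (c, k) := by
      simp [List.getLast?_append]
    by_cases h : d = c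
    · subst h
      have hstep : pvGroupStep (g ++ [(d, k)]) d = g ++ [(d, k + 1)] := by
        simp [pvGroupStep, hlast]
      rw [List.foldl_cons, hstep, ih]
      have htw : (d :: rest).takeWhile (· = d) = d :: rest.takeWhile (· = d) := by
        simp [List.takeWhile]
      have hdw : (d :: rest).dropWhile (· = d) = rest.dropWhile (· = d) := by
        simp [List.dropWhile]
      simp only [pvRleAux, htw, hdw, List.length_cons]
      push_cast
      ring_nf
    · have hstep : pvGroupStep (g ++ [(c, k)]) d = (g ++ [(c, k)]) ++ [(d, 1)] := by
        have : ¬ (c = d) := fun hh => h hh.symm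
        simp [pvGroupStep, hlast, this]
      rw [List.foldl_cons, hstep, ih]
      have htw : (d :: rest).takeWhile (· = c) = [] := by
        simp [List.takeWhile, h]
      have hdw : (d :: rest).dropWhile (· = c) = d :: rest := by
        simp [List.dropWhile, h]
      simp only [pvRleAux, htw, hdw, List.length_nil, Nat.cast_zero, add_zero]
      rw [pvRleSpec]
      simp

theorem pvRle_eq (cs : List Char) : cs.foldl pvGroupStep [] = pvRleSpec cs := by
  cases cs with
  | nil => simp [pvRleSpec]
  | cons d rest =>
    have hstep : pvGroupStep [] d = [] ++ [(d, 1)] := by simp [pvGroupStep]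
    rw [List.foldl_cons, hstep, pvFold_group]
    rw [pvRleSpec]
    simp [pvRleAux]

-- A's loop steps one-by-one through a prefix of non-dot characters
theorem pvGoA_skip (m : Int) : ∀ (d : List Char), (∀ x ∈ d, x ≠ '.') →
    ∀ (r : List Char) (i : Int), pvGoA m (d ++ r) i = pvGoA m r (i + d.length) := by
  intro d
  induction d with
  | nil => intro _ r i; simp
  | cons x rest ih =>
    intro h r i
    have hx : ¬ (x = '.') := h x (by simp)
    rw [List.cons_append, pvGoA]
    simp only [if_neg hx]
    rw [ih (fun y hy => h y (by simp [hy])) r (i + 1)]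
    congr 1
    push_cast [List.length_cons]
    ring

theorem pvEatDots_eq (cs : List Char) (i : Int) :
    pvEatDots cs i = (cs.dropWhile (· = '.'), i + (cs.takeWhile (· = '.')).length) := by
  induction cs generalizing i with
  | nil => simp [pvEatDots]
  | cons c rest ih =>
    by_cases h : c = '.'
    · simp [pvEatDots, h, List.dropWhile, List.takeWhile, ih]
      ring
    · simp [pvEatDots, h, List.dropWhile, List.takeWhile]

theorem pvMain (m : Int) : ∀ (N : ℕ) (cs : List Char), cs.length ≤ N →
    ∀ (runs : List (Int × Int)) (pos : Int),
    ((pvRleSpec cs).foldl (pvStepB m) (runs, pos)).1 = runs ++ pvGoA m cs pos := by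
  intro N
  induction N with
  | zero =>
    intro cs hlen runs pos
    have : cs = [] := List.eq_nil_of_length_eq_zero (Nat.le_zero.mp hlen)
    subst this
    simp [pvRleSpec, pvGoA]
  | succ N ihN =>
    intro cs hlen runs pos
    match cs with
    | [] => simp [pvRleSpec, pvGoA]
    | c :: rest =>
      set t : ℕ := (rest.takeWhile (· = c)).length with ht
      set r : List Char := rest.dropWhile (· = c) with hr
      have hL : pvRleSpec (c :: rest) = (c, 1 + (t : Int)) :: pvRleSpec r := by
        rw [pvRleSpec]
      have hrlen : r.length ≤ N := by
        have h1 : r.length ≤ rest.length := List.length_dropWhile_le _ _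
        have h2 : rest.length + 1 ≤ N + 1 := by simpa using hlen
        omega
      have hstep : pvStepB m (runs, pos) (c, 1 + (t : Int)) =
          ((if c = '.' ∧ 1 + (t : Int) ≥ m then runs ++ [(pos, pos + (1 + (t : Int)))] else runs),
            pos + (1 + (t : Int))) := by
        simp [pvStepB]
      rw [hL, List.foldl_cons, hstep, ihN r hrlen]
      by_cases h : c = '.'
      · subst h
        rw [pvGoA]
        simp only [pvEatDots_eq, ← ht, ← hr]
        have hcond : (pos + 1 + (t : Int)) - pos ≥ m ↔ 1 + (t : Int) ≥ m := by omega
        have hpos : pos + 1 + (t : Int) = pos + (1 + (t : Int)) := by ring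
        by_cases hc : 1 + (t : Int) ≥ m
        · simp [hc, hpos]
        · simp [hc, hpos]
      · have hsplit : rest = rest.takeWhile (· = c) ++ r := (List.takeWhile_append_dropWhile).symm
        have hall : ∀ x ∈ rest.takeWhile (· = c), x ≠ '.' := by
          intro x hx
          have hxc : x = c := by simpa using List.mem_takeWhile_imp hx
          rw [hxc]; exact h
        rw [pvGoA]
        simp only [if_neg h]
        conv_rhs => rw [hsplit]
        rw [pvGoA_skip m _ hall r (pos + 1), ← ht]
        have : pos + 1 + (t : Int) = pos + (1 + (t : Int)) := by ring
        rw [this]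
        simp [h]

-- ===== VERDICT (by name: the statement is the Claim_ definition above) =====
theorem find_unpaired_runs_spec : Claim_equal_find_unpaired_runs := by
  intro struct min_len _
  unfold Spec_find_unpaired_runs find_unpaired_runs find_unpaired_runs_alt
  rw [pvRle_eq, pvMain min_len struct.toList.length struct.toList (le_refl _) [] 0]
  simp
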